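-- pv_equiv track=rewrite | github.com/STENTORS/number-plates | license.py | licenseLocation
-- ===== SOURCE A (Python) =====
-- def licenseLocation(location):
--     regionID = {
--         "Anglia": {
--             "Peterborough": ["AA", "AB", "AC", "AD", "AE", "AF", "AG", "AH", "AJ", "AK", "AL", "AM", "AN"],
--             "Norwich": ["AO", "AP", "AR", "AS", "AT", "AU"],
--             "Ipswich": ["AV", "AW", "AX", "AY"]
--         },
--         "Birmingham": {
--             "Birmingham": ["BA", "BB", "BC", "BD", "BE", "BF", "BG", "BH", "BJ", "BK", "BL", "BM", "BN", "BO",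
--                            "BP", "BR", "BS", "BT", "BU", "BV", "BW", "BX", "BY"]
--         },
--         "Cymru": {
--             "Cardiff": ["CA", "CB", "CC", "CD", "CE", "CF", "CG", "CH", "CJ", "CK", "CL", "CM", "CN", "CO"],
--             "Swansea": ["CP", "CR", "CS", "CT", "CU", "CV"],
--             "Bangor": ["CW", "CX", "CY"]
--         },
--         "Deeside to Shrewsbury": {
--             "Chester": ["DA", "DB", "DC", "DD", "DE", "DF", "DG", "DH", "DJ", "DK"],
--             "Shrewsbury": ["DL", "DM", "DN", "DO", "DP", "DR", "DS", "DT", "DU", "DV", "DW", "DX", "DY"]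
--         },
--         "Essex": {
--             "Chelmsford": ["EA", "EB", "EC", "ED", "EE", "EF", "EG", "EH", "EJ", "EK", "EL", "EM", "EN", "EO",
--                            "EP", "ER", "ES", "ET", "EU", "EV", "EW", "EX", "EY"]
--         },
--         "Forest and Fens": {
--             "Nottingham": ["FA", "FB", "FC", "FD", "FE", "FF", "FG", "FH", "FJ", "FK", "FL", "FM", "FN", "FP"],
--             "Lincoln": ["FR", "FS", "FT", "FV", "FW", "FX", "FY"]
--         },
--         "Garden of England": {
--             "Maidstone": ["GA", "GB", "GC", "GD", "GE", "GF", "GG", "GH", "GJ", "GK", "GL", "GM", "GN", "GO"],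
--             "Brighton": ["GP", "GR", "GS", "GT", "GU", "GV", "GX", "GY"]
--         },
--         "Hampshire and Dorset": {
--             "Bournemouth": ["HA", "HB", "HC", "HD", "HE", "HF", "HG", "HH", "HJ"],
--             "Portsmouth": ["HK", "HL", "HM", "HN", "HO", "HP", "HR", "HS", "HT", "HU", "HV", "HX", "HY"],
--             "Portsmouth (Isle of Wight)": ["HW"]
--         },
--         "Luton": {
--             "Luton": ["KA", "KB", "KC", "KD", "KE", "KF", "KG", "KH", "KJ", "KK", "KL"]
--         },
--         "Northampton": {
--             "Northampton": ["KM", "KN", "KO", "KP", "KR", "KS", "KT", "KU", "KV", "KW", "KX", "KY"]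
--         },
--         "London": {
--             "Wimbledon": ["LA", "LB", "LC", "LD", "LE", "LF", "LG", "LH", "LJ"],
--             "Stanmore": ["LK", "LL", "LM", "LN", "LO", "LP", "LR", "LS", "LT"],
--             "Sidcup": ["LU", "LV", "LW", "LX", "LY"]
--         },
--         "Manchester and Merseyside": {
--             "Manchester": ["MA", "MB", "MC", "MD", "ME", "MF", "MG", "MH", "MJ", "MK", "ML", "MM", "MN", "MO", "MP",
--                            "MR", "MS", "MT", "MU", "MV", "MW", "MX", "MY"]
--         },
--         "North": {
--             "Newcastle": ["NA", "NB", "NC", "ND", "NE", "NF", "NG", "NH", "NJ", "NK", "NL", "NM", "NN", "NO"]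
--         },
--         "Stockton": {
--             "Stockton": ["NP", "NR", "NS", "NT", "NU", "NV", "NW", "NX", "NY"]
--         },
--         "Oxford": {
--             "Oxford": ["OA", "OB", "OC", "OD", "OE", "OF", "OG", "OH", "OJ", "OK", "OL", "OM", "ON", "OO", "OP",
--                        "OR", "OS", "OT", "OU", "OV", "OW", "OX", "OY"]
--         },
--         "Preston": {
--             "Preston": ["PA", "PB", "PC", "PD", "PE", "PF", "PG", "PH", "PJ", "PK", "PL", "PM", "PN", "PO", "PP",
--                         "PR", "PS", "PT"],
--             "Carlisle": ["PU", "PV", "PW", "PX", "PY"]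
--         },
--         "Reading": {
--             "Reading": ["RA", "RB", "RC", "RD", "RE", "RF", "RG", "RH", "RJ", "RK", "RL", "RM", "RN", "RO", "RP",
--                         "RR", "RS", "RT", "RU", "RV", "RW", "RX", "RY"]
--         },
--         "Scotland": {
--             "Glasgow": ["SA", "SB", "SC", "SD", "SE", "SF", "SG", "SH", "SJ"],
--             "Edinburgh": ["SK", "SL", "SM", "SN", "SO"],
--             "Dundee": ["SP", "SR", "SS", "ST"],
--             "Aberdeen": ["SU", "SV", "SW"],
--             "Inverness": ["SX", "SY"]
--         },
--         "Severn Valley": {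
--             "Worcester": ["VA", "VB", "VC", "VD", "VE", "VF", "VG", "VH", "VJ", "VK", "VL", "VM", "VN", "VO", "VP",
--                           "VR", "VS", "VT", "VU", "VV", "VW", "VX", "VY"]
--         },
--         "West of England": {
--             "Exeter": ["WA", "WB", "WC", "WD", "WE", "WF", "WG", "WH", "WJ"],
--             "Truro": ["WK", "WL"],
--             "Bristol": ["WM", "WN", "WO", "WP", "WR", "WS", "WT", "WU", "WV", "WW", "WX", "WY"]
--         },
--         "Yorkshire": {
--             "Leeds": ["YA", "YB", "YC", "YD", "YE", "YF", "YG", "YH", "YJ", "YK"],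
--             "Sheffield": ["YL", "YM", "YN", "YO", "YP", "YR", "YS", "YT", "YU"],
--             "Beverley": ["YV", "YW", "YX", "YY"]
--         }
--     }
--
--     for region, offices in regionID.items():
--         for office, tags in offices.items():
--             if location in tags:
--                 return region, office
--     return "Unknown", "Unknown"
-- ===== SOURCE B (Python) =====
-- _LOC = {
--     'AA': ('Anglia', 'Peterborough'),
--     'AB': ('Anglia', 'Peterborough'),
--     'AC': ('Anglia', 'Peterborough'),
--     'AD': ('Anglia', 'Peterborough'),
--     'AE': ('Anglia', 'Peterborough'),
--     'AF': ('Anglia', 'Peterborough'),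
--     'AG': ('Anglia', 'Peterborough'),
--     'AH': ('Anglia', 'Peterborough'),
--     'AJ': ('Anglia', 'Peterborough'),
--     'AK': ('Anglia', 'Peterborough'),
--     'AL': ('Anglia', 'Peterborough'),
--     'AM': ('Anglia', 'Peterborough'),
--     'AN': ('Anglia', 'Peterborough'),
--     'AO': ('Anglia', 'Norwich'),
--     'AP': ('Anglia', 'Norwich'),
--     'AR': ('Anglia', 'Norwich'),
--     'AS': ('Anglia', 'Norwich'),
--     'AT': ('Anglia', 'Norwich'),
--     'AU': ('Anglia', 'Norwich'),
--     'AV': ('Anglia', 'Ipswich'),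
--     'AW': ('Anglia', 'Ipswich'),
--     'AX': ('Anglia', 'Ipswich'),
--     'AY': ('Anglia', 'Ipswich'),
--     'BA': ('Birmingham', 'Birmingham'),
--     'BB': ('Birmingham', 'Birmingham'),
--     'BC': ('Birmingham', 'Birmingham'),
--     'BD': ('Birmingham', 'Birmingham'),
--     'BE': ('Birmingham', 'Birmingham'),
--     'BF': ('Birmingham', 'Birmingham'),
--     'BG': ('Birmingham', 'Birmingham'),
--     'BH': ('Birmingham', 'Birmingham'),
--     'BJ': ('Birmingham', 'Birmingham'),
--     'BK': ('Birmingham', 'Birmingham'),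
--     'BL': ('Birmingham', 'Birmingham'),
--     'BM': ('Birmingham', 'Birmingham'),
--     'BN': ('Birmingham', 'Birmingham'),
--     'BO': ('Birmingham', 'Birmingham'),
--     'BP': ('Birmingham', 'Birmingham'),
--     'BR': ('Birmingham', 'Birmingham'),
--     'BS': ('Birmingham', 'Birmingham'),
--     'BT': ('Birmingham', 'Birmingham'),
--     'BU': ('Birmingham', 'Birmingham'),
--     'BV': ('Birmingham', 'Birmingham'),
--     'BW': ('Birmingham', 'Birmingham'),
--     'BX': ('Birmingham', 'Birmingham'),
--     'BY': ('Birmingham', 'Birmingham'),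
--     'CA': ('Cymru', 'Cardiff'),
--     'CB': ('Cymru', 'Cardiff'),
--     'CC': ('Cymru', 'Cardiff'),
--     'CD': ('Cymru', 'Cardiff'),
--     'CE': ('Cymru', 'Cardiff'),
--     'CF': ('Cymru', 'Cardiff'),
--     'CG': ('Cymru', 'Cardiff'),
--     'CH': ('Cymru', 'Cardiff'),
--     'CJ': ('Cymru', 'Cardiff'),
--     'CK': ('Cymru', 'Cardiff'),
--     'CL': ('Cymru', 'Cardiff'),
--     'CM': ('Cymru', 'Cardiff'),
--     'CN': ('Cymru', 'Cardiff'),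
--     'CO': ('Cymru', 'Cardiff'),
--     'CP': ('Cymru', 'Swansea'),
--     'CR': ('Cymru', 'Swansea'),
--     'CS': ('Cymru', 'Swansea'),
--     'CT': ('Cymru', 'Swansea'),
--     'CU': ('Cymru', 'Swansea'),
--     'CV': ('Cymru', 'Swansea'),
--     'CW': ('Cymru', 'Bangor'),
--     'CX': ('Cymru', 'Bangor'),
--     'CY': ('Cymru', 'Bangor'),
--     'DA': ('Deeside to Shrewsbury', 'Chester'),
--     'DB': ('Deeside to Shrewsbury', 'Chester'),
--     'DC': ('Deeside to Shrewsbury', 'Chester'),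
--     'DD': ('Deeside to Shrewsbury', 'Chester'),
--     'DE': ('Deeside to Shrewsbury', 'Chester'),
--     'DF': ('Deeside to Shrewsbury', 'Chester'),
--     'DG': ('Deeside to Shrewsbury', 'Chester'),
--     'DH': ('Deeside to Shrewsbury', 'Chester'),
--     'DJ': ('Deeside to Shrewsbury', 'Chester'),
--     'DK': ('Deeside to Shrewsbury', 'Chester'),
--     'DL': ('Deeside to Shrewsbury', 'Shrewsbury'),
--     'DM': ('Deeside to Shrewsbury', 'Shrewsbury'),
--     'DN': ('Deeside to Shrewsbury', 'Shrewsbury'),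
--     'DO': ('Deeside to Shrewsbury', 'Shrewsbury'),
--     'DP': ('Deeside to Shrewsbury', 'Shrewsbury'),
--     'DR': ('Deeside to Shrewsbury', 'Shrewsbury'),
--     'DS': ('Deeside to Shrewsbury', 'Shrewsbury'),
--     'DT': ('Deeside to Shrewsbury', 'Shrewsbury'),
--     'DU': ('Deeside to Shrewsbury', 'Shrewsbury'),
--     'DV': ('Deeside to Shrewsbury', 'Shrewsbury'),
--     'DW': ('Deeside to Shrewsbury', 'Shrewsbury'),
--     'DX': ('Deeside to Shrewsbury', 'Shrewsbury'),
--     'DY': ('Deeside to Shrewsbury', 'Shrewsbury'),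
--     'EA': ('Essex', 'Chelmsford'),
--     'EB': ('Essex', 'Chelmsford'),
--     'EC': ('Essex', 'Chelmsford'),
--     'ED': ('Essex', 'Chelmsford'),
--     'EE': ('Essex', 'Chelmsford'),
--     'EF': ('Essex', 'Chelmsford'),
--     'EG': ('Essex', 'Chelmsford'),
--     'EH': ('Essex', 'Chelmsford'),
--     'EJ': ('Essex', 'Chelmsford'),
--     'EK': ('Essex', 'Chelmsford'),
--     'EL': ('Essex', 'Chelmsford'),
--     'EM': ('Essex', 'Chelmsford'),
--     'EN': ('Essex', 'Chelmsford'),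
--     'EO': ('Essex', 'Chelmsford'),
--     'EP': ('Essex', 'Chelmsford'),
--     'ER': ('Essex', 'Chelmsford'),
--     'ES': ('Essex', 'Chelmsford'),
--     'ET': ('Essex', 'Chelmsford'),
--     'EU': ('Essex', 'Chelmsford'),
--     'EV': ('Essex', 'Chelmsford'),
--     'EW': ('Essex', 'Chelmsford'),
--     'EX': ('Essex', 'Chelmsford'),
--     'EY': ('Essex', 'Chelmsford'),
--     'FA': ('Forest and Fens', 'Nottingham'),
--     'FB': ('Forest and Fens', 'Nottingham'),
--     'FC': ('Forest and Fens', 'Nottingham'),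
--     'FD': ('Forest and Fens', 'Nottingham'),
--     'FE': ('Forest and Fens', 'Nottingham'),
--     'FF': ('Forest and Fens', 'Nottingham'),
--     'FG': ('Forest and Fens', 'Nottingham'),
--     'FH': ('Forest and Fens', 'Nottingham'),
--     'FJ': ('Forest and Fens', 'Nottingham'),
--     'FK': ('Forest and Fens', 'Nottingham'),
--     'FL': ('Forest and Fens', 'Nottingham'),
--     'FM': ('Forest and Fens', 'Nottingham'),
--     'FN': ('Forest and Fens', 'Nottingham'),
--     'FP': ('Forest and Fens', 'Nottingham'),
--     'FR': ('Forest and Fens', 'Lincoln'),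
--     'FS': ('Forest and Fens', 'Lincoln'),
--     'FT': ('Forest and Fens', 'Lincoln'),
--     'FV': ('Forest and Fens', 'Lincoln'),
--     'FW': ('Forest and Fens', 'Lincoln'),
--     'FX': ('Forest and Fens', 'Lincoln'),
--     'FY': ('Forest and Fens', 'Lincoln'),
--     'GA': ('Garden of England', 'Maidstone'),
--     'GB': ('Garden of England', 'Maidstone'),
--     'GC': ('Garden of England', 'Maidstone'),
--     'GD': ('Garden of England', 'Maidstone'),
--     'GE': ('Garden of England', 'Maidstone'),
--     'GF': ('Garden of England', 'Maidstone'),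
--     'GG': ('Garden of England', 'Maidstone'),
--     'GH': ('Garden of England', 'Maidstone'),
--     'GJ': ('Garden of England', 'Maidstone'),
--     'GK': ('Garden of England', 'Maidstone'),
--     'GL': ('Garden of England', 'Maidstone'),
--     'GM': ('Garden of England', 'Maidstone'),
--     'GN': ('Garden of England', 'Maidstone'),
--     'GO': ('Garden of England', 'Maidstone'),
--     'GP': ('Garden of England', 'Brighton'),
--     'GR': ('Garden of England', 'Brighton'),
--     'GS': ('Garden of England', 'Brighton'),
--     'GT': ('Garden of England', 'Brighton'),
--     'GU': ('Garden of England', 'Brighton'),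
--     'GV': ('Garden of England', 'Brighton'),
--     'GX': ('Garden of England', 'Brighton'),
--     'GY': ('Garden of England', 'Brighton'),
--     'HA': ('Hampshire and Dorset', 'Bournemouth'),
--     'HB': ('Hampshire and Dorset', 'Bournemouth'),
--     'HC': ('Hampshire and Dorset', 'Bournemouth'),
--     'HD': ('Hampshire and Dorset', 'Bournemouth'),
--     'HE': ('Hampshire and Dorset', 'Bournemouth'),
--     'HF': ('Hampshire and Dorset', 'Bournemouth'),
--     'HG': ('Hampshire and Dorset', 'Bournemouth'),
--     'HH': ('Hampshire and Dorset', 'Bournemouth'),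
--     'HJ': ('Hampshire and Dorset', 'Bournemouth'),
--     'HK': ('Hampshire and Dorset', 'Portsmouth'),
--     'HL': ('Hampshire and Dorset', 'Portsmouth'),
--     'HM': ('Hampshire and Dorset', 'Portsmouth'),
--     'HN': ('Hampshire and Dorset', 'Portsmouth'),
--     'HO': ('Hampshire and Dorset', 'Portsmouth'),
--     'HP': ('Hampshire and Dorset', 'Portsmouth'),
--     'HR': ('Hampshire and Dorset', 'Portsmouth'),
--     'HS': ('Hampshire and Dorset', 'Portsmouth'),
--     'HT': ('Hampshire and Dorset', 'Portsmouth'),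
--     'HU': ('Hampshire and Dorset', 'Portsmouth'),
--     'HV': ('Hampshire and Dorset', 'Portsmouth'),
--     'HX': ('Hampshire and Dorset', 'Portsmouth'),
--     'HY': ('Hampshire and Dorset', 'Portsmouth'),
--     'HW': ('Hampshire and Dorset', 'Portsmouth (Isle of Wight)'),
--     'KA': ('Luton', 'Luton'),
--     'KB': ('Luton', 'Luton'),
--     'KC': ('Luton', 'Luton'),
--     'KD': ('Luton', 'Luton'),
--     'KE': ('Luton', 'Luton'),
--     'KF': ('Luton', 'Luton'),
--     'KG': ('Luton', 'Luton'),
--     'KH': ('Luton', 'Luton'),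
--     'KJ': ('Luton', 'Luton'),
--     'KK': ('Luton', 'Luton'),
--     'KL': ('Luton', 'Luton'),
--     'KM': ('Northampton', 'Northampton'),
--     'KN': ('Northampton', 'Northampton'),
--     'KO': ('Northampton', 'Northampton'),
--     'KP': ('Northampton', 'Northampton'),
--     'KR': ('Northampton', 'Northampton'),
--     'KS': ('Northampton', 'Northampton'),
--     'KT': ('Northampton', 'Northampton'),
--     'KU': ('Northampton', 'Northampton'),
--     'KV': ('Northampton', 'Northampton'),
--     'KW': ('Northampton', 'Northampton'),
--     'KX': ('Northampton', 'Northampton'),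
--     'KY': ('Northampton', 'Northampton'),
--     'LA': ('London', 'Wimbledon'),
--     'LB': ('London', 'Wimbledon'),
--     'LC': ('London', 'Wimbledon'),
--     'LD': ('London', 'Wimbledon'),
--     'LE': ('London', 'Wimbledon'),
--     'LF': ('London', 'Wimbledon'),
--     'LG': ('London', 'Wimbledon'),
--     'LH': ('London', 'Wimbledon'),
--     'LJ': ('London', 'Wimbledon'),
--     'LK': ('London', 'Stanmore'),
--     'LL': ('London', 'Stanmore'),
--     'LM': ('London', 'Stanmore'),
--     'LN': ('London', 'Stanmore'),
--     'LO': ('London', 'Stanmore'),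
--     'LP': ('London', 'Stanmore'),
--     'LR': ('London', 'Stanmore'),
--     'LS': ('London', 'Stanmore'),
--     'LT': ('London', 'Stanmore'),
--     'LU': ('London', 'Sidcup'),
--     'LV': ('London', 'Sidcup'),
--     'LW': ('London', 'Sidcup'),
--     'LX': ('London', 'Sidcup'),
--     'LY': ('London', 'Sidcup'),
--     'MA': ('Manchester and Merseyside', 'Manchester'),
--     'MB': ('Manchester and Merseyside', 'Manchester'),
--     'MC': ('Manchester and Merseyside', 'Manchester'),
--     'MD': ('Manchester and Merseyside', 'Manchester'),
--     'ME': ('Manchester and Merseyside', 'Manchester'),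
--     'MF': ('Manchester and Merseyside', 'Manchester'),
--     'MG': ('Manchester and Merseyside', 'Manchester'),
--     'MH': ('Manchester and Merseyside', 'Manchester'),
--     'MJ': ('Manchester and Merseyside', 'Manchester'),
--     'MK': ('Manchester and Merseyside', 'Manchester'),
--     'ML': ('Manchester and Merseyside', 'Manchester'),
--     'MM': ('Manchester and Merseyside', 'Manchester'),
--     'MN': ('Manchester and Merseyside', 'Manchester'),
--     'MO': ('Manchester and Merseyside', 'Manchester'),
--     'MP': ('Manchester and Merseyside', 'Manchester'),
--     'MR': ('Manchester and Merseyside', 'Manchester'),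
--     'MS': ('Manchester and Merseyside', 'Manchester'),
--     'MT': ('Manchester and Merseyside', 'Manchester'),
--     'MU': ('Manchester and Merseyside', 'Manchester'),
--     'MV': ('Manchester and Merseyside', 'Manchester'),
--     'MW': ('Manchester and Merseyside', 'Manchester'),
--     'MX': ('Manchester and Merseyside', 'Manchester'),
--     'MY': ('Manchester and Merseyside', 'Manchester'),
--     'NA': ('North', 'Newcastle'),
--     'NB': ('North', 'Newcastle'),
--     'NC': ('North', 'Newcastle'),
--     'ND': ('North', 'Newcastle'),
--     'NE': ('North', 'Newcastle'),
--     'NF': ('North', 'Newcastle'),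
--     'NG': ('North', 'Newcastle'),
--     'NH': ('North', 'Newcastle'),
--     'NJ': ('North', 'Newcastle'),
--     'NK': ('North', 'Newcastle'),
--     'NL': ('North', 'Newcastle'),
--     'NM': ('North', 'Newcastle'),
--     'NN': ('North', 'Newcastle'),
--     'NO': ('North', 'Newcastle'),
--     'NP': ('Stockton', 'Stockton'),
--     'NR': ('Stockton', 'Stockton'),
--     'NS': ('Stockton', 'Stockton'),
--     'NT': ('Stockton', 'Stockton'),
--     'NU': ('Stockton', 'Stockton'),
--     'NV': ('Stockton', 'Stockton'),
--     'NW': ('Stockton', 'Stockton'),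
--     'NX': ('Stockton', 'Stockton'),
--     'NY': ('Stockton', 'Stockton'),
--     'OA': ('Oxford', 'Oxford'),
--     'OB': ('Oxford', 'Oxford'),
--     'OC': ('Oxford', 'Oxford'),
--     'OD': ('Oxford', 'Oxford'),
--     'OE': ('Oxford', 'Oxford'),
--     'OF': ('Oxford', 'Oxford'),
--     'OG': ('Oxford', 'Oxford'),
--     'OH': ('Oxford', 'Oxford'),
--     'OJ': ('Oxford', 'Oxford'),
--     'OK': ('Oxford', 'Oxford'),
--     'OL': ('Oxford', 'Oxford'),
--     'OM': ('Oxford', 'Oxford'),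
--     'ON': ('Oxford', 'Oxford'),
--     'OO': ('Oxford', 'Oxford'),
--     'OP': ('Oxford', 'Oxford'),
--     'OR': ('Oxford', 'Oxford'),
--     'OS': ('Oxford', 'Oxford'),
--     'OT': ('Oxford', 'Oxford'),
--     'OU': ('Oxford', 'Oxford'),
--     'OV': ('Oxford', 'Oxford'),
--     'OW': ('Oxford', 'Oxford'),
--     'OX': ('Oxford', 'Oxford'),
--     'OY': ('Oxford', 'Oxford'),
--     'PA': ('Preston', 'Preston'),
--     'PB': ('Preston', 'Preston'),
--     'PC': ('Preston', 'Preston'),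
--     'PD': ('Preston', 'Preston'),
--     'PE': ('Preston', 'Preston'),
--     'PF': ('Preston', 'Preston'),
--     'PG': ('Preston', 'Preston'),
--     'PH': ('Preston', 'Preston'),
--     'PJ': ('Preston', 'Preston'),
--     'PK': ('Preston', 'Preston'),
--     'PL': ('Preston', 'Preston'),
--     'PM': ('Preston', 'Preston'),
--     'PN': ('Preston', 'Preston'),
--     'PO': ('Preston', 'Preston'),
--     'PP': ('Preston', 'Preston'),
--     'PR': ('Preston', 'Preston'),
--     'PS': ('Preston', 'Preston'),
--     'PT': ('Preston', 'Preston'),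
--     'PU': ('Preston', 'Carlisle'),
--     'PV': ('Preston', 'Carlisle'),
--     'PW': ('Preston', 'Carlisle'),
--     'PX': ('Preston', 'Carlisle'),
--     'PY': ('Preston', 'Carlisle'),
--     'RA': ('Reading', 'Reading'),
--     'RB': ('Reading', 'Reading'),
--     'RC': ('Reading', 'Reading'),
--     'RD': ('Reading', 'Reading'),
--     'RE': ('Reading', 'Reading'),
--     'RF': ('Reading', 'Reading'),
--     'RG': ('Reading', 'Reading'),
--     'RH': ('Reading', 'Reading'),
--     'RJ': ('Reading', 'Reading'),
--     'RK': ('Reading', 'Reading'),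
--     'RL': ('Reading', 'Reading'),
--     'RM': ('Reading', 'Reading'),
--     'RN': ('Reading', 'Reading'),
--     'RO': ('Reading', 'Reading'),
--     'RP': ('Reading', 'Reading'),
--     'RR': ('Reading', 'Reading'),
--     'RS': ('Reading', 'Reading'),
--     'RT': ('Reading', 'Reading'),
--     'RU': ('Reading', 'Reading'),
--     'RV': ('Reading', 'Reading'),
--     'RW': ('Reading', 'Reading'),
--     'RX': ('Reading', 'Reading'),
--     'RY': ('Reading', 'Reading'),
--     'SA': ('Scotland', 'Glasgow'),
--     'SB': ('Scotland', 'Glasgow'),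
--     'SC': ('Scotland', 'Glasgow'),
--     'SD': ('Scotland', 'Glasgow'),
--     'SE': ('Scotland', 'Glasgow'),
--     'SF': ('Scotland', 'Glasgow'),
--     'SG': ('Scotland', 'Glasgow'),
--     'SH': ('Scotland', 'Glasgow'),
--     'SJ': ('Scotland', 'Glasgow'),
--     'SK': ('Scotland', 'Edinburgh'),
--     'SL': ('Scotland', 'Edinburgh'),
--     'SM': ('Scotland', 'Edinburgh'),
--     'SN': ('Scotland', 'Edinburgh'),
--     'SO': ('Scotland', 'Edinburgh'),
--     'SP': ('Scotland', 'Dundee'),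
--     'SR': ('Scotland', 'Dundee'),
--     'SS': ('Scotland', 'Dundee'),
--     'ST': ('Scotland', 'Dundee'),
--     'SU': ('Scotland', 'Aberdeen'),
--     'SV': ('Scotland', 'Aberdeen'),
--     'SW': ('Scotland', 'Aberdeen'),
--     'SX': ('Scotland', 'Inverness'),
--     'SY': ('Scotland', 'Inverness'),
--     'VA': ('Severn Valley', 'Worcester'),
--     'VB': ('Severn Valley', 'Worcester'),
--     'VC': ('Severn Valley', 'Worcester'),
--     'VD': ('Severn Valley', 'Worcester'),
--     'VE': ('Severn Valley', 'Worcester'),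
--     'VF': ('Severn Valley', 'Worcester'),
--     'VG': ('Severn Valley', 'Worcester'),
--     'VH': ('Severn Valley', 'Worcester'),
--     'VJ': ('Severn Valley', 'Worcester'),
--     'VK': ('Severn Valley', 'Worcester'),
--     'VL': ('Severn Valley', 'Worcester'),
--     'VM': ('Severn Valley', 'Worcester'),
--     'VN': ('Severn Valley', 'Worcester'),
--     'VO': ('Severn Valley', 'Worcester'),
--     'VP': ('Severn Valley', 'Worcester'),
--     'VR': ('Severn Valley', 'Worcester'),
--     'VS': ('Severn Valley', 'Worcester'),
--     'VT': ('Severn Valley', 'Worcester'),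
--     'VU': ('Severn Valley', 'Worcester'),
--     'VV': ('Severn Valley', 'Worcester'),
--     'VW': ('Severn Valley', 'Worcester'),
--     'VX': ('Severn Valley', 'Worcester'),
--     'VY': ('Severn Valley', 'Worcester'),
--     'WA': ('West of England', 'Exeter'),
--     'WB': ('West of England', 'Exeter'),
--     'WC': ('West of England', 'Exeter'),
--     'WD': ('West of England', 'Exeter'),
--     'WE': ('West of England', 'Exeter'),
--     'WF': ('West of England', 'Exeter'),
--     'WG': ('West of England', 'Exeter'),
--     'WH': ('West of England', 'Exeter'),
--     'WJ': ('West of England', 'Exeter'),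
--     'WK': ('West of England', 'Truro'),
--     'WL': ('West of England', 'Truro'),
--     'WM': ('West of England', 'Bristol'),
--     'WN': ('West of England', 'Bristol'),
--     'WO': ('West of England', 'Bristol'),
--     'WP': ('West of England', 'Bristol'),
--     'WR': ('West of England', 'Bristol'),
--     'WS': ('West of England', 'Bristol'),
--     'WT': ('West of England', 'Bristol'),
--     'WU': ('West of England', 'Bristol'),
--     'WV': ('West of England', 'Bristol'),
--     'WW': ('West of England', 'Bristol'),
--     'WX': ('West of England', 'Bristol'),
--     'WY': ('West of England', 'Bristol'),
--     'YA': ('Yorkshire', 'Leeds'),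
--     'YB': ('Yorkshire', 'Leeds'),
--     'YC': ('Yorkshire', 'Leeds'),
--     'YD': ('Yorkshire', 'Leeds'),
--     'YE': ('Yorkshire', 'Leeds'),
--     'YF': ('Yorkshire', 'Leeds'),
--     'YG': ('Yorkshire', 'Leeds'),
--     'YH': ('Yorkshire', 'Leeds'),
--     'YJ': ('Yorkshire', 'Leeds'),
--     'YK': ('Yorkshire', 'Leeds'),
--     'YL': ('Yorkshire', 'Sheffield'),
--     'YM': ('Yorkshire', 'Sheffield'),
--     'YN': ('Yorkshire', 'Sheffield'),
--     'YO': ('Yorkshire', 'Sheffield'),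
--     'YP': ('Yorkshire', 'Sheffield'),
--     'YR': ('Yorkshire', 'Sheffield'),
--     'YS': ('Yorkshire', 'Sheffield'),
--     'YT': ('Yorkshire', 'Sheffield'),
--     'YU': ('Yorkshire', 'Sheffield'),
--     'YV': ('Yorkshire', 'Beverley'),
--     'YW': ('Yorkshire', 'Beverley'),
--     'YX': ('Yorkshire', 'Beverley'),
--     'YY': ('Yorkshire', 'Beverley'),
-- }
--
--
-- def licenseLocation(location):
--     return _LOC.get(location, ("Unknown", "Unknown"))
-- ===== Notes on version B (the rewrite author's own statement) =====
-- stated objective: idiomatic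
-- what changed: Replaced A's nested double loop over the region->office->tags structure with a single flat dict mapping each tag directly to its (region, office) pair, so the lookup is one dict.get with a default.
import Mathlib
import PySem

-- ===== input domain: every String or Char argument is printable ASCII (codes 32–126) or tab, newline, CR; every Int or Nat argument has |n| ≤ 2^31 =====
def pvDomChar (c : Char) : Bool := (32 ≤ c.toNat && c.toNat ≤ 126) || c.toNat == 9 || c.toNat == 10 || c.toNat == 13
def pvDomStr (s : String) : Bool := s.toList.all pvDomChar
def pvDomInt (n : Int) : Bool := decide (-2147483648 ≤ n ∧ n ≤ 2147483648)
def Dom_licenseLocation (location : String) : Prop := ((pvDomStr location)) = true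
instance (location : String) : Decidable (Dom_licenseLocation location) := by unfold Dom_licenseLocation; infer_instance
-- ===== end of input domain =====

-- B replaces A's nested loops over the region/office dictionaries by a single lookup in one
-- flat tag → (region, office) dictionary (idiomatic; no tag is duplicated, so order is irrelevant).

-- ===== PORT A =====
-- A's nested dict literal: region → (office → list of tags), in source order.
def pvTable_licenseLocation : List (String × List (String × List String)) := [
  ("Anglia", [("Peterborough", ["AA", "AB", "AC", "AD", "AE", "AF", "AG", "AH", "AJ", "AK", "AL", "AM", "AN"]),
    ("Norwich", ["AO", "AP", "AR", "AS", "AT", "AU"]),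
    ("Ipswich", ["AV", "AW", "AX", "AY"])]),
  ("Birmingham", [("Birmingham", ["BA", "BB", "BC", "BD", "BE", "BF", "BG", "BH", "BJ", "BK", "BL", "BM", "BN", "BO", "BP", "BR", "BS", "BT", "BU", "BV", "BW", "BX", "BY"])]),
  ("Cymru", [("Cardiff", ["CA", "CB", "CC", "CD", "CE", "CF", "CG", "CH", "CJ", "CK", "CL", "CM", "CN", "CO"]),
    ("Swansea", ["CP", "CR", "CS", "CT", "CU", "CV"]),
    ("Bangor", ["CW", "CX", "CY"])]),
  ("Deeside to Shrewsbury", [("Chester", ["DA", "DB", "DC", "DD", "DE", "DF", "DG", "DH", "DJ", "DK"]),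
    ("Shrewsbury", ["DL", "DM", "DN", "DO", "DP", "DR", "DS", "DT", "DU", "DV", "DW", "DX", "DY"])]),
  ("Essex", [("Chelmsford", ["EA", "EB", "EC", "ED", "EE", "EF", "EG", "EH", "EJ", "EK", "EL", "EM", "EN", "EO", "EP", "ER", "ES", "ET", "EU", "EV", "EW", "EX", "EY"])]),
  ("Forest and Fens", [("Nottingham", ["FA", "FB", "FC", "FD", "FE", "FF", "FG", "FH", "FJ", "FK", "FL", "FM", "FN", "FP"]),
    ("Lincoln", ["FR", "FS", "FT", "FV", "FW", "FX", "FY"])]),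
  ("Garden of England", [("Maidstone", ["GA", "GB", "GC", "GD", "GE", "GF", "GG", "GH", "GJ", "GK", "GL", "GM", "GN", "GO"]),
    ("Brighton", ["GP", "GR", "GS", "GT", "GU", "GV", "GX", "GY"])]),
  ("Hampshire and Dorset", [("Bournemouth", ["HA", "HB", "HC", "HD", "HE", "HF", "HG", "HH", "HJ"]),
    ("Portsmouth", ["HK", "HL", "HM", "HN", "HO", "HP", "HR", "HS", "HT", "HU", "HV", "HX", "HY"]),
    ("Portsmouth (Isle of Wight)", ["HW"])]),
  ("Luton", [("Luton", ["KA", "KB", "KC", "KD", "KE", "KF", "KG", "KH", "KJ", "KK", "KL"])]),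
  ("Northampton", [("Northampton", ["KM", "KN", "KO", "KP", "KR", "KS", "KT", "KU", "KV", "KW", "KX", "KY"])]),
  ("London", [("Wimbledon", ["LA", "LB", "LC", "LD", "LE", "LF", "LG", "LH", "LJ"]),
    ("Stanmore", ["LK", "LL", "LM", "LN", "LO", "LP", "LR", "LS", "LT"]),
    ("Sidcup", ["LU", "LV", "LW", "LX", "LY"])]),
  ("Manchester and Merseyside", [("Manchester", ["MA", "MB", "MC", "MD", "ME", "MF", "MG", "MH", "MJ", "MK", "ML", "MM", "MN", "MO", "MP", "MR", "MS", "MT", "MU", "MV", "MW", "MX", "MY"])]),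
  ("North", [("Newcastle", ["NA", "NB", "NC", "ND", "NE", "NF", "NG", "NH", "NJ", "NK", "NL", "NM", "NN", "NO"])]),
  ("Stockton", [("Stockton", ["NP", "NR", "NS", "NT", "NU", "NV", "NW", "NX", "NY"])]),
  ("Oxford", [("Oxford", ["OA", "OB", "OC", "OD", "OE", "OF", "OG", "OH", "OJ", "OK", "OL", "OM", "ON", "OO", "OP", "OR", "OS", "OT", "OU", "OV", "OW", "OX", "OY"])]),
  ("Preston", [("Preston", ["PA", "PB", "PC", "PD", "PE", "PF", "PG", "PH", "PJ", "PK", "PL", "PM", "PN", "PO", "PP", "PR", "PS", "PT"]),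
    ("Carlisle", ["PU", "PV", "PW", "PX", "PY"])]),
  ("Reading", [("Reading", ["RA", "RB", "RC", "RD", "RE", "RF", "RG", "RH", "RJ", "RK", "RL", "RM", "RN", "RO", "RP", "RR", "RS", "RT", "RU", "RV", "RW", "RX", "RY"])]),
  ("Scotland", [("Glasgow", ["SA", "SB", "SC", "SD", "SE", "SF", "SG", "SH", "SJ"]),
    ("Edinburgh", ["SK", "SL", "SM", "SN", "SO"]),
    ("Dundee", ["SP", "SR", "SS", "ST"]),
    ("Aberdeen", ["SU", "SV", "SW"]),
    ("Inverness", ["SX", "SY"])]),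
  ("Severn Valley", [("Worcester", ["VA", "VB", "VC", "VD", "VE", "VF", "VG", "VH", "VJ", "VK", "VL", "VM", "VN", "VO", "VP", "VR", "VS", "VT", "VU", "VV", "VW", "VX", "VY"])]),
  ("West of England", [("Exeter", ["WA", "WB", "WC", "WD", "WE", "WF", "WG", "WH", "WJ"]),
    ("Truro", ["WK", "WL"]),
    ("Bristol", ["WM", "WN", "WO", "WP", "WR", "WS", "WT", "WU", "WV", "WW", "WX", "WY"])]),
  ("Yorkshire", [("Leeds", ["YA", "YB", "YC", "YD", "YE", "YF", "YG", "YH", "YJ", "YK"]),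
    ("Sheffield", ["YL", "YM", "YN", "YO", "YP", "YR", "YS", "YT", "YU"]),
    ("Beverley", ["YV", "YW", "YX", "YY"])])]

-- inner 'for office, tags in offices.items(): if location in tags: return region, office'
def pvFindOffice (location : String) : List (String × List String) → Option String
  | [] => none
  | (office, tags) :: rest =>
      if tags.contains location then some office else pvFindOffice location rest

-- outer 'for region, offices in regionID.items(): …'
def pvFindRegion (location : String) : List (String × List (String × List String)) → Option (String × String)
  | [] => none
  | (region, offices) :: rest =>
      match pvFindOffice location offices with
      | some office => some (region, office)
      | none => pvFindRegion location rest

def licenseLocation (location : String) : String × String :=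
  match pvFindRegion location pvTable_licenseLocation with
  | some ro => ro
  | none => ("Unknown", "Unknown")

-- ===== PORT B =====
-- Source B's flat module-level dict literal _LOC : tag → (region, office)
def pvFlat_licenseLocation : PySem.Dict String (String × String) := PySem.Dict.mk [
  ("AA", ("Anglia", "Peterborough")),
  ("AB", ("Anglia", "Peterborough")),
  ("AC", ("Anglia", "Peterborough")),
  ("AD", ("Anglia", "Peterborough")),
  ("AE", ("Anglia", "Peterborough")),
  ("AF", ("Anglia", "Peterborough")),
  ("AG", ("Anglia", "Peterborough")),
  ("AH", ("Anglia", "Peterborough")),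
  ("AJ", ("Anglia", "Peterborough")),
  ("AK", ("Anglia", "Peterborough")),
  ("AL", ("Anglia", "Peterborough")),
  ("AM", ("Anglia", "Peterborough")),
  ("AN", ("Anglia", "Peterborough")),
  ("AO", ("Anglia", "Norwich")),
  ("AP", ("Anglia", "Norwich")),
  ("AR", ("Anglia", "Norwich")),
  ("AS", ("Anglia", "Norwich")),
  ("AT", ("Anglia", "Norwich")),
  ("AU", ("Anglia", "Norwich")),
  ("AV", ("Anglia", "Ipswich")),
  ("AW", ("Anglia", "Ipswich")),
  ("AX", ("Anglia", "Ipswich")),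
  ("AY", ("Anglia", "Ipswich")),
  ("BA", ("Birmingham", "Birmingham")),
  ("BB", ("Birmingham", "Birmingham")),
  ("BC", ("Birmingham", "Birmingham")),
  ("BD", ("Birmingham", "Birmingham")),
  ("BE", ("Birmingham", "Birmingham")),
  ("BF", ("Birmingham", "Birmingham")),
  ("BG", ("Birmingham", "Birmingham")),
  ("BH", ("Birmingham", "Birmingham")),
  ("BJ", ("Birmingham", "Birmingham")),
  ("BK", ("Birmingham", "Birmingham")),
  ("BL", ("Birmingham", "Birmingham")),
  ("BM", ("Birmingham", "Birmingham")),
  ("BN", ("Birmingham", "Birmingham")),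
  ("BO", ("Birmingham", "Birmingham")),
  ("BP", ("Birmingham", "Birmingham")),
  ("BR", ("Birmingham", "Birmingham")),
  ("BS", ("Birmingham", "Birmingham")),
  ("BT", ("Birmingham", "Birmingham")),
  ("BU", ("Birmingham", "Birmingham")),
  ("BV", ("Birmingham", "Birmingham")),
  ("BW", ("Birmingham", "Birmingham")),
  ("BX", ("Birmingham", "Birmingham")),
  ("BY", ("Birmingham", "Birmingham")),
  ("CA", ("Cymru", "Cardiff")),
  ("CB", ("Cymru", "Cardiff")),
  ("CC", ("Cymru", "Cardiff")),
  ("CD", ("Cymru", "Cardiff")),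
  ("CE", ("Cymru", "Cardiff")),
  ("CF", ("Cymru", "Cardiff")),
  ("CG", ("Cymru", "Cardiff")),
  ("CH", ("Cymru", "Cardiff")),
  ("CJ", ("Cymru", "Cardiff")),
  ("CK", ("Cymru", "Cardiff")),
  ("CL", ("Cymru", "Cardiff")),
  ("CM", ("Cymru", "Cardiff")),
  ("CN", ("Cymru", "Cardiff")),
  ("CO", ("Cymru", "Cardiff")),
  ("CP", ("Cymru", "Swansea")),
  ("CR", ("Cymru", "Swansea")),
  ("CS", ("Cymru", "Swansea")),
  ("CT", ("Cymru", "Swansea")),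
  ("CU", ("Cymru", "Swansea")),
  ("CV", ("Cymru", "Swansea")),
  ("CW", ("Cymru", "Bangor")),
  ("CX", ("Cymru", "Bangor")),
  ("CY", ("Cymru", "Bangor")),
  ("DA", ("Deeside to Shrewsbury", "Chester")),
  ("DB", ("Deeside to Shrewsbury", "Chester")),
  ("DC", ("Deeside to Shrewsbury", "Chester")),
  ("DD", ("Deeside to Shrewsbury", "Chester")),
  ("DE", ("Deeside to Shrewsbury", "Chester")),
  ("DF", ("Deeside to Shrewsbury", "Chester")),
  ("DG", ("Deeside to Shrewsbury", "Chester")),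
  ("DH", ("Deeside to Shrewsbury", "Chester")),
  ("DJ", ("Deeside to Shrewsbury", "Chester")),
  ("DK", ("Deeside to Shrewsbury", "Chester")),
  ("DL", ("Deeside to Shrewsbury", "Shrewsbury")),
  ("DM", ("Deeside to Shrewsbury", "Shrewsbury")),
  ("DN", ("Deeside to Shrewsbury", "Shrewsbury")),
  ("DO", ("Deeside to Shrewsbury", "Shrewsbury")),
  ("DP", ("Deeside to Shrewsbury", "Shrewsbury")),
  ("DR", ("Deeside to Shrewsbury", "Shrewsbury")),
  ("DS", ("Deeside to Shrewsbury", "Shrewsbury")),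
  ("DT", ("Deeside to Shrewsbury", "Shrewsbury")),
  ("DU", ("Deeside to Shrewsbury", "Shrewsbury")),
  ("DV", ("Deeside to Shrewsbury", "Shrewsbury")),
  ("DW", ("Deeside to Shrewsbury", "Shrewsbury")),
  ("DX", ("Deeside to Shrewsbury", "Shrewsbury")),
  ("DY", ("Deeside to Shrewsbury", "Shrewsbury")),
  ("EA", ("Essex", "Chelmsford")),
  ("EB", ("Essex", "Chelmsford")),
  ("EC", ("Essex", "Chelmsford")),
  ("ED", ("Essex", "Chelmsford")),
  ("EE", ("Essex", "Chelmsford")),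
  ("EF", ("Essex", "Chelmsford")),
  ("EG", ("Essex", "Chelmsford")),
  ("EH", ("Essex", "Chelmsford")),
  ("EJ", ("Essex", "Chelmsford")),
  ("EK", ("Essex", "Chelmsford")),
  ("EL", ("Essex", "Chelmsford")),
  ("EM", ("Essex", "Chelmsford")),
  ("EN", ("Essex", "Chelmsford")),
  ("EO", ("Essex", "Chelmsford")),
  ("EP", ("Essex", "Chelmsford")),
  ("ER", ("Essex", "Chelmsford")),
  ("ES", ("Essex", "Chelmsford")),
  ("ET", ("Essex", "Chelmsford")),
  ("EU", ("Essex", "Chelmsford")),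
  ("EV", ("Essex", "Chelmsford")),
  ("EW", ("Essex", "Chelmsford")),
  ("EX", ("Essex", "Chelmsford")),
  ("EY", ("Essex", "Chelmsford")),
  ("FA", ("Forest and Fens", "Nottingham")),
  ("FB", ("Forest and Fens", "Nottingham")),
  ("FC", ("Forest and Fens", "Nottingham")),
  ("FD", ("Forest and Fens", "Nottingham")),
  ("FE", ("Forest and Fens", "Nottingham")),
  ("FF", ("Forest and Fens", "Nottingham")),
  ("FG", ("Forest and Fens", "Nottingham")),
  ("FH", ("Forest and Fens", "Nottingham")),
  ("FJ", ("Forest and Fens", "Nottingham")),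
  ("FK", ("Forest and Fens", "Nottingham")),
  ("FL", ("Forest and Fens", "Nottingham")),
  ("FM", ("Forest and Fens", "Nottingham")),
  ("FN", ("Forest and Fens", "Nottingham")),
  ("FP", ("Forest and Fens", "Nottingham")),
  ("FR", ("Forest and Fens", "Lincoln")),
  ("FS", ("Forest and Fens", "Lincoln")),
  ("FT", ("Forest and Fens", "Lincoln")),
  ("FV", ("Forest and Fens", "Lincoln")),
  ("FW", ("Forest and Fens", "Lincoln")),
  ("FX", ("Forest and Fens", "Lincoln")),
  ("FY", ("Forest and Fens", "Lincoln")),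
  ("GA", ("Garden of England", "Maidstone")),
  ("GB", ("Garden of England", "Maidstone")),
  ("GC", ("Garden of England", "Maidstone")),
  ("GD", ("Garden of England", "Maidstone")),
  ("GE", ("Garden of England", "Maidstone")),
  ("GF", ("Garden of England", "Maidstone")),
  ("GG", ("Garden of England", "Maidstone")),
  ("GH", ("Garden of England", "Maidstone")),
  ("GJ", ("Garden of England", "Maidstone")),
  ("GK", ("Garden of England", "Maidstone")),
  ("GL", ("Garden of England", "Maidstone")),
  ("GM", ("Garden of England", "Maidstone")),
  ("GN", ("Garden of England", "Maidstone")),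
  ("GO", ("Garden of England", "Maidstone")),
  ("GP", ("Garden of England", "Brighton")),
  ("GR", ("Garden of England", "Brighton")),
  ("GS", ("Garden of England", "Brighton")),
  ("GT", ("Garden of England", "Brighton")),
  ("GU", ("Garden of England", "Brighton")),
  ("GV", ("Garden of England", "Brighton")),
  ("GX", ("Garden of England", "Brighton")),
  ("GY", ("Garden of England", "Brighton")),
  ("HA", ("Hampshire and Dorset", "Bournemouth")),
  ("HB", ("Hampshire and Dorset", "Bournemouth")),
  ("HC", ("Hampshire and Dorset", "Bournemouth")),
  ("HD", ("Hampshire and Dorset", "Bournemouth")),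
  ("HE", ("Hampshire and Dorset", "Bournemouth")),
  ("HF", ("Hampshire and Dorset", "Bournemouth")),
  ("HG", ("Hampshire and Dorset", "Bournemouth")),
  ("HH", ("Hampshire and Dorset", "Bournemouth")),
  ("HJ", ("Hampshire and Dorset", "Bournemouth")),
  ("HK", ("Hampshire and Dorset", "Portsmouth")),
  ("HL", ("Hampshire and Dorset", "Portsmouth")),
  ("HM", ("Hampshire and Dorset", "Portsmouth")),
  ("HN", ("Hampshire and Dorset", "Portsmouth")),
  ("HO", ("Hampshire and Dorset", "Portsmouth")),
  ("HP", ("Hampshire and Dorset", "Portsmouth")),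
  ("HR", ("Hampshire and Dorset", "Portsmouth")),
  ("HS", ("Hampshire and Dorset", "Portsmouth")),
  ("HT", ("Hampshire and Dorset", "Portsmouth")),
  ("HU", ("Hampshire and Dorset", "Portsmouth")),
  ("HV", ("Hampshire and Dorset", "Portsmouth")),
  ("HX", ("Hampshire and Dorset", "Portsmouth")),
  ("HY", ("Hampshire and Dorset", "Portsmouth")),
  ("HW", ("Hampshire and Dorset", "Portsmouth (Isle of Wight)")),
  ("KA", ("Luton", "Luton")),
  ("KB", ("Luton", "Luton")),
  ("KC", ("Luton", "Luton")),
  ("KD", ("Luton", "Luton")),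
  ("KE", ("Luton", "Luton")),
  ("KF", ("Luton", "Luton")),
  ("KG", ("Luton", "Luton")),
  ("KH", ("Luton", "Luton")),
  ("KJ", ("Luton", "Luton")),
  ("KK", ("Luton", "Luton")),
  ("KL", ("Luton", "Luton")),
  ("KM", ("Northampton", "Northampton")),
  ("KN", ("Northampton", "Northampton")),
  ("KO", ("Northampton", "Northampton")),
  ("KP", ("Northampton", "Northampton")),
  ("KR", ("Northampton", "Northampton")),
  ("KS", ("Northampton", "Northampton")),
  ("KT", ("Northampton", "Northampton")),
  ("KU", ("Northampton", "Northampton")),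
  ("KV", ("Northampton", "Northampton")),
  ("KW", ("Northampton", "Northampton")),
  ("KX", ("Northampton", "Northampton")),
  ("KY", ("Northampton", "Northampton")),
  ("LA", ("London", "Wimbledon")),
  ("LB", ("London", "Wimbledon")),
  ("LC", ("London", "Wimbledon")),
  ("LD", ("London", "Wimbledon")),
  ("LE", ("London", "Wimbledon")),
  ("LF", ("London", "Wimbledon")),
  ("LG", ("London", "Wimbledon")),
  ("LH", ("London", "Wimbledon")),
  ("LJ", ("London", "Wimbledon")),
  ("LK", ("London", "Stanmore")),
  ("LL", ("London", "Stanmore")),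
  ("LM", ("London", "Stanmore")),
  ("LN", ("London", "Stanmore")),
  ("LO", ("London", "Stanmore")),
  ("LP", ("London", "Stanmore")),
  ("LR", ("London", "Stanmore")),
  ("LS", ("London", "Stanmore")),
  ("LT", ("London", "Stanmore")),
  ("LU", ("London", "Sidcup")),
  ("LV", ("London", "Sidcup")),
  ("LW", ("London", "Sidcup")),
  ("LX", ("London", "Sidcup")),
  ("LY", ("London", "Sidcup")),
  ("MA", ("Manchester and Merseyside", "Manchester")),
  ("MB", ("Manchester and Merseyside", "Manchester")),
  ("MC", ("Manchester and Merseyside", "Manchester")),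
  ("MD", ("Manchester and Merseyside", "Manchester")),
  ("ME", ("Manchester and Merseyside", "Manchester")),
  ("MF", ("Manchester and Merseyside", "Manchester")),
  ("MG", ("Manchester and Merseyside", "Manchester")),
  ("MH", ("Manchester and Merseyside", "Manchester")),
  ("MJ", ("Manchester and Merseyside", "Manchester")),
  ("MK", ("Manchester and Merseyside", "Manchester")),
  ("ML", ("Manchester and Merseyside", "Manchester")),
  ("MM", ("Manchester and Merseyside", "Manchester")),
  ("MN", ("Manchester and Merseyside", "Manchester")),
  ("MO", ("Manchester and Merseyside", "Manchester")),
  ("MP", ("Manchester and Merseyside", "Manchester")),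
  ("MR", ("Manchester and Merseyside", "Manchester")),
  ("MS", ("Manchester and Merseyside", "Manchester")),
  ("MT", ("Manchester and Merseyside", "Manchester")),
  ("MU", ("Manchester and Merseyside", "Manchester")),
  ("MV", ("Manchester and Merseyside", "Manchester")),
  ("MW", ("Manchester and Merseyside", "Manchester")),
  ("MX", ("Manchester and Merseyside", "Manchester")),
  ("MY", ("Manchester and Merseyside", "Manchester")),
  ("NA", ("North", "Newcastle")),
  ("NB", ("North", "Newcastle")),
  ("NC", ("North", "Newcastle")),
  ("ND", ("North", "Newcastle")),
  ("NE", ("North", "Newcastle")),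
  ("NF", ("North", "Newcastle")),
  ("NG", ("North", "Newcastle")),
  ("NH", ("North", "Newcastle")),
  ("NJ", ("North", "Newcastle")),
  ("NK", ("North", "Newcastle")),
  ("NL", ("North", "Newcastle")),
  ("NM", ("North", "Newcastle")),
  ("NN", ("North", "Newcastle")),
  ("NO", ("North", "Newcastle")),
  ("NP", ("Stockton", "Stockton")),
  ("NR", ("Stockton", "Stockton")),
  ("NS", ("Stockton", "Stockton")),
  ("NT", ("Stockton", "Stockton")),
  ("NU", ("Stockton", "Stockton")),
  ("NV", ("Stockton", "Stockton")),
  ("NW", ("Stockton", "Stockton")),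
  ("NX", ("Stockton", "Stockton")),
  ("NY", ("Stockton", "Stockton")),
  ("OA", ("Oxford", "Oxford")),
  ("OB", ("Oxford", "Oxford")),
  ("OC", ("Oxford", "Oxford")),
  ("OD", ("Oxford", "Oxford")),
  ("OE", ("Oxford", "Oxford")),
  ("OF", ("Oxford", "Oxford")),
  ("OG", ("Oxford", "Oxford")),
  ("OH", ("Oxford", "Oxford")),
  ("OJ", ("Oxford", "Oxford")),
  ("OK", ("Oxford", "Oxford")),
  ("OL", ("Oxford", "Oxford")),
  ("OM", ("Oxford", "Oxford")),
  ("ON", ("Oxford", "Oxford")),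
  ("OO", ("Oxford", "Oxford")),
  ("OP", ("Oxford", "Oxford")),
  ("OR", ("Oxford", "Oxford")),
  ("OS", ("Oxford", "Oxford")),
  ("OT", ("Oxford", "Oxford")),
  ("OU", ("Oxford", "Oxford")),
  ("OV", ("Oxford", "Oxford")),
  ("OW", ("Oxford", "Oxford")),
  ("OX", ("Oxford", "Oxford")),
  ("OY", ("Oxford", "Oxford")),
  ("PA", ("Preston", "Preston")),
  ("PB", ("Preston", "Preston")),
  ("PC", ("Preston", "Preston")),
  ("PD", ("Preston", "Preston")),
  ("PE", ("Preston", "Preston")),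
  ("PF", ("Preston", "Preston")),
  ("PG", ("Preston", "Preston")),
  ("PH", ("Preston", "Preston")),
  ("PJ", ("Preston", "Preston")),
  ("PK", ("Preston", "Preston")),
  ("PL", ("Preston", "Preston")),
  ("PM", ("Preston", "Preston")),
  ("PN", ("Preston", "Preston")),
  ("PO", ("Preston", "Preston")),
  ("PP", ("Preston", "Preston")),
  ("PR", ("Preston", "Preston")),
  ("PS", ("Preston", "Preston")),
  ("PT", ("Preston", "Preston")),
  ("PU", ("Preston", "Carlisle")),
  ("PV", ("Preston", "Carlisle")),
  ("PW", ("Preston", "Carlisle")),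
  ("PX", ("Preston", "Carlisle")),
  ("PY", ("Preston", "Carlisle")),
  ("RA", ("Reading", "Reading")),
  ("RB", ("Reading", "Reading")),
  ("RC", ("Reading", "Reading")),
  ("RD", ("Reading", "Reading")),
  ("RE", ("Reading", "Reading")),
  ("RF", ("Reading", "Reading")),
  ("RG", ("Reading", "Reading")),
  ("RH", ("Reading", "Reading")),
  ("RJ", ("Reading", "Reading")),
  ("RK", ("Reading", "Reading")),
  ("RL", ("Reading", "Reading")),
  ("RM", ("Reading", "Reading")),
  ("RN", ("Reading", "Reading")),
  ("RO", ("Reading", "Reading")),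
  ("RP", ("Reading", "Reading")),
  ("RR", ("Reading", "Reading")),
  ("RS", ("Reading", "Reading")),
  ("RT", ("Reading", "Reading")),
  ("RU", ("Reading", "Reading")),
  ("RV", ("Reading", "Reading")),
  ("RW", ("Reading", "Reading")),
  ("RX", ("Reading", "Reading")),
  ("RY", ("Reading", "Reading")),
  ("SA", ("Scotland", "Glasgow")),
  ("SB", ("Scotland", "Glasgow")),
  ("SC", ("Scotland", "Glasgow")),
  ("SD", ("Scotland", "Glasgow")),
  ("SE", ("Scotland", "Glasgow")),
  ("SF", ("Scotland", "Glasgow")),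
  ("SG", ("Scotland", "Glasgow")),
  ("SH", ("Scotland", "Glasgow")),
  ("SJ", ("Scotland", "Glasgow")),
  ("SK", ("Scotland", "Edinburgh")),
  ("SL", ("Scotland", "Edinburgh")),
  ("SM", ("Scotland", "Edinburgh")),
  ("SN", ("Scotland", "Edinburgh")),
  ("SO", ("Scotland", "Edinburgh")),
  ("SP", ("Scotland", "Dundee")),
  ("SR", ("Scotland", "Dundee")),
  ("SS", ("Scotland", "Dundee")),
  ("ST", ("Scotland", "Dundee")),
  ("SU", ("Scotland", "Aberdeen")),
  ("SV", ("Scotland", "Aberdeen")),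
  ("SW", ("Scotland", "Aberdeen")),
  ("SX", ("Scotland", "Inverness")),
  ("SY", ("Scotland", "Inverness")),
  ("VA", ("Severn Valley", "Worcester")),
  ("VB", ("Severn Valley", "Worcester")),
  ("VC", ("Severn Valley", "Worcester")),
  ("VD", ("Severn Valley", "Worcester")),
  ("VE", ("Severn Valley", "Worcester")),
  ("VF", ("Severn Valley", "Worcester")),
  ("VG", ("Severn Valley", "Worcester")),
  ("VH", ("Severn Valley", "Worcester")),
  ("VJ", ("Severn Valley", "Worcester")),
  ("VK", ("Severn Valley", "Worcester")),
  ("VL", ("Severn Valley", "Worcester")),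
  ("VM", ("Severn Valley", "Worcester")),
  ("VN", ("Severn Valley", "Worcester")),
  ("VO", ("Severn Valley", "Worcester")),
  ("VP", ("Severn Valley", "Worcester")),
  ("VR", ("Severn Valley", "Worcester")),
  ("VS", ("Severn Valley", "Worcester")),
  ("VT", ("Severn Valley", "Worcester")),
  ("VU", ("Severn Valley", "Worcester")),
  ("VV", ("Severn Valley", "Worcester")),
  ("VW", ("Severn Valley", "Worcester")),
  ("VX", ("Severn Valley", "Worcester")),
  ("VY", ("Severn Valley", "Worcester")),
  ("WA", ("West of England", "Exeter")),
  ("WB", ("West of England", "Exeter")),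
  ("WC", ("West of England", "Exeter")),
  ("WD", ("West of England", "Exeter")),
  ("WE", ("West of England", "Exeter")),
  ("WF", ("West of England", "Exeter")),
  ("WG", ("West of England", "Exeter")),
  ("WH", ("West of England", "Exeter")),
  ("WJ", ("West of England", "Exeter")),
  ("WK", ("West of England", "Truro")),
  ("WL", ("West of England", "Truro")),
  ("WM", ("West of England", "Bristol")),
  ("WN", ("West of England", "Bristol")),
  ("WO", ("West of England", "Bristol")),
  ("WP", ("West of England", "Bristol")),
  ("WR", ("West of England", "Bristol")),
  ("WS", ("West of England", "Bristol")),
  ("WT", ("West of England", "Bristol")),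
  ("WU", ("West of England", "Bristol")),
  ("WV", ("West of England", "Bristol")),
  ("WW", ("West of England", "Bristol")),
  ("WX", ("West of England", "Bristol")),
  ("WY", ("West of England", "Bristol")),
  ("YA", ("Yorkshire", "Leeds")),
  ("YB", ("Yorkshire", "Leeds")),
  ("YC", ("Yorkshire", "Leeds")),
  ("YD", ("Yorkshire", "Leeds")),
  ("YE", ("Yorkshire", "Leeds")),
  ("YF", ("Yorkshire", "Leeds")),
  ("YG", ("Yorkshire", "Leeds")),
  ("YH", ("Yorkshire", "Leeds")),
  ("YJ", ("Yorkshire", "Leeds")),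
  ("YK", ("Yorkshire", "Leeds")),
  ("YL", ("Yorkshire", "Sheffield")),
  ("YM", ("Yorkshire", "Sheffield")),
  ("YN", ("Yorkshire", "Sheffield")),
  ("YO", ("Yorkshire", "Sheffield")),
  ("YP", ("Yorkshire", "Sheffield")),
  ("YR", ("Yorkshire", "Sheffield")),
  ("YS", ("Yorkshire", "Sheffield")),
  ("YT", ("Yorkshire", "Sheffield")),
  ("YU", ("Yorkshire", "Sheffield")),
  ("YV", ("Yorkshire", "Beverley")),
  ("YW", ("Yorkshire", "Beverley")),
  ("YX", ("Yorkshire", "Beverley")),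
  ("YY", ("Yorkshire", "Beverley"))]

def licenseLocation_alt (location : String) : String × String :=
  PySem.Dict.getD pvFlat_licenseLocation location ("Unknown", "Unknown")

-- ===== PRECONDITION & SPEC =====
def Spec_licenseLocation (location : String) (out : String × String) : Prop := out = licenseLocation_alt location
instance (location : String) (out : String × String) : Decidable (Spec_licenseLocation location out) := by unfold Spec_licenseLocation; infer_instance

-- ===== CLAIM (what is proved, stated in full; the proofs are below) =====
def Claim_equal_licenseLocation : Prop := ∀ (location : String), Dom_licenseLocation location → Spec_licenseLocation location (licenseLocation location)

-- ===== LEMMAS AND PROOFS =====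

-- flattening a nested table in source order
def pvFlatten (tbl : List (String × List (String × List String))) : List (String × (String × String)) :=
  tbl.flatMap (fun ro => ro.2.flatMap (fun ot => ot.2.map (fun t => (t, (ro.1, ot.1)))))

theorem pv_get?_mk_nil {ν : Type} (x : String) :
    (PySem.Dict.mk ([] : List (String × ν))).get? x = none := rfl

theorem pv_get?_mk_append {ν : Type} (l₁ l₂ : List (String × ν)) (x : String) :
    (PySem.Dict.mk (l₁ ++ l₂)).get? x =
      ((PySem.Dict.mk l₁).get? x).or ((PySem.Dict.mk l₂).get? x) := by
  induction l₁ with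
  | nil => simp [pv_get?_mk_nil]
  | cons p rest ih =>
      obtain ⟨k, v⟩ := p
      rw [List.cons_append, PySem.Dict.get?_mk_cons, PySem.Dict.get?_mk_cons]
      split_ifs with h
      · rfl
      · exact ih

theorem pv_get?_mk_const {ν : Type} (tags : List String) (v : ν) (x : String) :
    (PySem.Dict.mk (tags.map (fun t => (t, v)))).get? x =
      if tags.contains x then some v else none := by
  induction tags with
  | nil => simp [pv_get?_mk_nil]
  | cons t rest ih =>
      rw [List.map_cons, PySem.Dict.get?_mk_cons]
      by_cases h : t = x
      · simp [h]
      · simp only [List.contains_cons]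
        have hb : (t == x) = false := by simp [h]
        have hx : x ≠ t := Ne.symm h
        simp [hb, ih, hx]

theorem pv_get?_offices (offices : List (String × List String)) (region x : String) :
    (PySem.Dict.mk (offices.flatMap (fun ot => ot.2.map (fun t => (t, (region, ot.1)))))).get? x =
      (pvFindOffice x offices).map (fun o => (region, o)) := by
  induction offices with
  | nil => simp [pvFindOffice, pv_get?_mk_nil]
  | cons p rest ih =>
      obtain ⟨office, tags⟩ := p
      rw [List.flatMap_cons, pv_get?_mk_append, pv_get?_mk_const]
      simp only [pvFindOffice]
      split_ifs with h
      · rfl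
      · simp [ih]

theorem pv_get?_flatten (tbl : List (String × List (String × List String))) (x : String) :
    (PySem.Dict.mk (pvFlatten tbl)).get? x = pvFindRegion x tbl := by
  induction tbl with
  | nil => simp [pvFlatten, pvFindRegion, pv_get?_mk_nil]
  | cons p rest ih =>
      obtain ⟨region, offices⟩ := p
      rw [pvFlatten, List.flatMap_cons, pv_get?_mk_append, pv_get?_offices]
      simp only [pvFindRegion]
      cases pvFindOffice x offices with
      | none => simpa [pvFlatten] using ih
      | some office => rfl

-- the literal flat dict in B is exactly the flattening of A's nested table
set_option maxRecDepth 4000 in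
theorem pv_flat_eq : pvFlat_licenseLocation = PySem.Dict.mk (pvFlatten pvTable_licenseLocation) := by
  rfl

-- ===== VERDICT (by name: the statement is the Claim_ definition above) =====
theorem licenseLocation_spec : Claim_equal_licenseLocation := by
  intro location _
  unfold Spec_licenseLocation licenseLocation licenseLocation_alt
  rw [pv_flat_eq, PySem.Dict.getD_eq_get?_getD, pv_get?_flatten]
  cases pvFindRegion location pvTable_licenseLocation <;> rfl
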